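-- pv_equiv track=rewrite | github.com/RWSalesfire/Russell-Linkedin-Content-Engine | generator.py | parse_draft
-- ===== SOURCE A (Python) =====
-- def parse_draft(raw_text):
--     """Parse delimiter-based draft output into structured dict."""
--     draft = {}
--
--     # All possible section delimiters across formats
--     sections = {
--         "---POST---": "post",
--         "---ALT_HOOK_1---": "alt_hook_1",
--         "---ALT_HOOK_2---": "alt_hook_2",
--         "---IMAGE_PROMPT---": "image_prompt",
--         "---SLIDE_1---": "slide_1",
--         "---SLIDE_2---": "slide_2",
--         "---SLIDE_3---": "slide_3",
--         "---SLIDE_4---": "slide_4",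
--         "---SLIDE_5---": "slide_5",
--         "---SLIDE_6---": "slide_6",
--         "---SLIDE_7---": "slide_7",
--         "---SLIDE_8---": "slide_8",
--         "---SLIDE_9---": "slide_9",
--         "---SLIDE_10---": "slide_10",
--         "---CAPTION---": "caption",
--         "---CONTEXT---": "context",
--         "---QUESTION---": "question",
--         "---OPTION_1---": "option_1",
--         "---OPTION_2---": "option_2",
--         "---OPTION_3---": "option_3",
--         "---OPTION_4---": "option_4",
--         "---NEEDS_RUSSELL_INPUT---": "story_scaffold",
--     }
--
--     current_key = None
--     current_lines = []
--
--     for line in raw_text.split("\n"):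
--         stripped = line.strip()
--         if stripped in sections:
--             if current_key:
--                 draft[current_key] = "\n".join(current_lines).strip()
--             current_key = sections[stripped]
--             current_lines = []
--         elif stripped == "---END---":
--             if current_key:
--                 draft[current_key] = "\n".join(current_lines).strip()
--             break
--         elif current_key is not None:
--             current_lines.append(line)
--
--     # Handle case where ---END--- is missing
--     if current_key and current_key not in draft:
--         draft[current_key] = "\n".join(current_lines).strip()
--
--     return draft
-- ===== SOURCE B (Python) =====
-- # Three-pass re-implementation: truncate at ---END---, group lines into
-- # (key, body) segments, then build the dict (unterminated final segment
-- # only fills a key that is not already present, as in the original).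
--
-- SECTIONS = {
--     "---POST---": "post",
--     "---ALT_HOOK_1---": "alt_hook_1",
--     "---ALT_HOOK_2---": "alt_hook_2",
--     "---IMAGE_PROMPT---": "image_prompt",
--     "---SLIDE_1---": "slide_1",
--     "---SLIDE_2---": "slide_2",
--     "---SLIDE_3---": "slide_3",
--     "---SLIDE_4---": "slide_4",
--     "---SLIDE_5---": "slide_5",
--     "---SLIDE_6---": "slide_6",
--     "---SLIDE_7---": "slide_7",
--     "---SLIDE_8---": "slide_8",
--     "---SLIDE_9---": "slide_9",
--     "---SLIDE_10---": "slide_10",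
--     "---CAPTION---": "caption",
--     "---CONTEXT---": "context",
--     "---QUESTION---": "question",
--     "---OPTION_1---": "option_1",
--     "---OPTION_2---": "option_2",
--     "---OPTION_3---": "option_3",
--     "---OPTION_4---": "option_4",
--     "---NEEDS_RUSSELL_INPUT---": "story_scaffold",
-- }
--
--
-- def parse_draft(raw_text):
--     """Parse delimiter-based draft output into structured dict."""
--     lines = raw_text.split("\n")
--
--     # 1. keep only the lines before the first ---END--- marker
--     ended = False
--     cut = []
--     for line in lines:
--         if line.strip() == "---END---":
--             ended = True
--             break
--         cut.append(line)
--
--     # 2. group into (key, body-lines) segments; text before the first delimiter is dropped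
--     segs = []
--     for line in cut:
--         key = SECTIONS.get(line.strip())
--         if key is not None:
--             segs.append((key, []))
--         elif segs:
--             segs[-1][1].append(line)
--
--     # 3. build the dict: every closed segment overwrites; an unterminated
--     #    final segment only fills a key that is not already present
--     draft = {}
--     for i, (key, body) in enumerate(segs):
--         text = "\n".join(body).strip()
--         if ended or i < len(segs) - 1:
--             draft[key] = text
--         elif key not in draft:
--             draft[key] = text
--     return draft
-- ===== Notes on version B (the rewrite author's own statement) =====
-- stated objective: alternative
-- what changed: A's single stateful loop (current_key/current_lines with inline dict writes and a break) is re-decomposed into three independent passes: truncate the line list at the first ---END---, group lines into (key, body) segments, then fold the segments into the dict, overwriting for closed segments and only filling a missing key for an unterminated final segment.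
import Mathlib
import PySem

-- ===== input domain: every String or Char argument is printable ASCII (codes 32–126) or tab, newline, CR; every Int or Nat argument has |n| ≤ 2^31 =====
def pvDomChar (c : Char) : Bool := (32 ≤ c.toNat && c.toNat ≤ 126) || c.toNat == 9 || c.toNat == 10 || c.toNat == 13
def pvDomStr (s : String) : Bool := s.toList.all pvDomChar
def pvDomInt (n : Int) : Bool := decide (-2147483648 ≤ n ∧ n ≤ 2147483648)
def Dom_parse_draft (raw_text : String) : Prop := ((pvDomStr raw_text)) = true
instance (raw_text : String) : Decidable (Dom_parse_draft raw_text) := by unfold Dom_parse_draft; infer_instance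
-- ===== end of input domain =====

-- B re-decomposes A's single stateful loop into three passes (truncate at ---END---,
-- group into segments, build the dict); same return value, objective: alternative decomposition.

-- the `sections` table, identical literal in both Python sources
def pvSections : PySem.Dict String String := PySem.Dict.mk [
  ("---POST---", "post"),
  ("---ALT_HOOK_1---", "alt_hook_1"),
  ("---ALT_HOOK_2---", "alt_hook_2"),
  ("---IMAGE_PROMPT---", "image_prompt"),
  ("---SLIDE_1---", "slide_1"),
  ("---SLIDE_2---", "slide_2"),
  ("---SLIDE_3---", "slide_3"),
  ("---SLIDE_4---", "slide_4"),
  ("---SLIDE_5---", "slide_5"),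
  ("---SLIDE_6---", "slide_6"),
  ("---SLIDE_7---", "slide_7"),
  ("---SLIDE_8---", "slide_8"),
  ("---SLIDE_9---", "slide_9"),
  ("---SLIDE_10---", "slide_10"),
  ("---CAPTION---", "caption"),
  ("---CONTEXT---", "context"),
  ("---QUESTION---", "question"),
  ("---OPTION_1---", "option_1"),
  ("---OPTION_2---", "option_2"),
  ("---OPTION_3---", "option_3"),
  ("---OPTION_4---", "option_4"),
  ("---NEEDS_RUSSELL_INPUT---", "story_scaffold")]

-- "\n".join(ls).strip() — written identically by both Python versions
def pvJS (ls : List String) : String := PySem.Str.strip (PySem.Str.join "\n" ls)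

-- ===== PORT A =====
-- A's for-loop over the lines with break; `if current_key:` is truthiness of a
-- nonempty-string-or-None variable, ported as the Option match.
def parseLoopA (lines : List String) (draft : PySem.Dict String String)
    (currentKey : Option String) (currentLines : List String) : PySem.Dict String String :=
  match lines with
  | [] =>
      -- trailing `if current_key and current_key not in draft`
      match currentKey with
      | some k => if draft.contains k then draft else draft.insert k (pvJS currentLines)
      | none => draft
  | line :: rest =>
      let stripped := PySem.Str.strip line
      match pvSections.get? stripped with
      | some key =>
          let draft' :=
            match currentKey with
            | some k => draft.insert k (pvJS currentLines)
            | none => draft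
          parseLoopA rest draft' (some key) []
      | none =>
          if stripped = "---END---" then
            -- break: the trailing check is a no-op afterwards (key just stored / no key)
            match currentKey with
            | some k => draft.insert k (pvJS currentLines)
            | none => draft
          else
            match currentKey with
            | some _ => parseLoopA rest draft currentKey (currentLines ++ [line])
            | none => parseLoopA rest draft currentKey currentLines

def parse_draft (raw_text : String) : List (String × String) :=
  (parseLoopA ((PySem.Str.split? raw_text "\n").getD []) PySem.Dict.empty none []).items

-- ===== PORT B =====
-- pass 1: lines before the first ---END---
def pvTruncate : List String → List String × Bool
  | [] => ([], false)
  | line :: rest =>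
      if PySem.Str.strip line = "---END---" then ([], true)
      else
        let (c, e) := pvTruncate rest
        (line :: c, e)

-- segs[-1][1].append(line)
def pvAppendLast (segs : List (String × List String)) (line : String) : List (String × List String) :=
  match segs with
  | [] => []
  | [(k, b)] => [(k, b ++ [line])]
  | s :: rest => s :: pvAppendLast rest line

-- pass 2 loop body
def pvGroupStep (segs : List (String × List String)) (line : String) : List (String × List String) :=
  match pvSections.get? (PySem.Str.strip line) with
  | some key => segs ++ [(key, [])]
  | none => if segs.isEmpty then segs else pvAppendLast segs line

-- pass 3 loop body: store segment i of n (overwrite unless it is an unterminated last segment)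
def pvReduceStep (ended : Bool) (n : Nat) (draft : PySem.Dict String String)
    (p : Int × (String × List String)) : PySem.Dict String String :=
  if ended || p.1 < (n : Int) - 1 then draft.insert p.2.1 (pvJS p.2.2)
  else if draft.contains p.2.1 then draft else draft.insert p.2.1 (pvJS p.2.2)

def parse_draft_alt (raw_text : String) : List (String × String) :=
  let lines := (PySem.Str.split? raw_text "\n").getD []
  let (cut, ended) := pvTruncate lines
  let segs := cut.foldl pvGroupStep []
  ((PySem.List.enumerate segs).foldl (pvReduceStep ended segs.length) PySem.Dict.empty).items

-- ===== PRECONDITION & SPEC =====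
def Spec_parse_draft (raw_text : String) (out : List (String × String)) : Prop := out = parse_draft_alt raw_text
instance (raw_text : String) (out : List (String × String)) : Decidable (Spec_parse_draft raw_text out) := by unfold Spec_parse_draft; infer_instance

-- ===== CLAIM (what is proved, stated in full; the proofs are below) =====
def Claim_equal_parse_draft : Prop := ∀ (raw_text : String), Dom_parse_draft raw_text → Spec_parse_draft raw_text (parse_draft raw_text)

-- ===== LEMMAS AND PROOFS =====

-- recursive characterisation of B's pass-2 fold
def pvGroupFrom (k : String) (acc : List String) : List String → List (String × List String)
  | [] => [(k, acc)]
  | l :: rest =>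
      match pvSections.get? (PySem.Str.strip l) with
      | some key => (k, acc) :: pvGroupFrom key [] rest
      | none => pvGroupFrom k (acc ++ [l]) rest

-- recursive characterisation of B's pass-3 fold
def pvFinish (ended : Bool) (d : PySem.Dict String String) :
    List (String × List String) → PySem.Dict String String
  | [] => d
  | [(k, b)] =>
      if ended then d.insert k (pvJS b)
      else if d.contains k then d else d.insert k (pvJS b)
  | (k, b) :: s :: t => pvFinish ended (d.insert k (pvJS b)) (s :: t)

theorem pvSections_end_none : pvSections.get? "---END---" = none := by decide

theorem pvAppendLast_append (segs : List (String × List String)) (k : String)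
    (acc : List String) (l : String) :
    pvAppendLast (segs ++ [(k, acc)]) l = segs ++ [(k, acc ++ [l])] := by
  induction segs with
  | nil => rfl
  | cons s ss ih => cases ss <;> simp_all [pvAppendLast]

theorem pvGroupStep_some {l key : String} (h : pvSections.get? (PySem.Str.strip l) = some key)
    (segs : List (String × List String)) : pvGroupStep segs l = segs ++ [(key, [])] := by
  simp [pvGroupStep, h]

theorem pvGroupStep_none {l : String} (h : pvSections.get? (PySem.Str.strip l) = none)
    (segs : List (String × List String)) :
    pvGroupStep segs l = if segs.isEmpty then segs else pvAppendLast segs l := by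
  simp [pvGroupStep, h]

theorem pvGroup_from (rest : List String) (segs : List (String × List String))
    (k : String) (acc : List String) :
    rest.foldl pvGroupStep (segs ++ [(k, acc)]) = segs ++ pvGroupFrom k acc rest := by
  induction rest generalizing segs k acc with
  | nil => simp [pvGroupFrom]
  | cons l rest ih =>
      rw [List.foldl_cons]
      cases h : pvSections.get? (PySem.Str.strip l) with
      | some key =>
          rw [pvGroupStep_some h, ih (segs ++ [(k, acc)]) key []]
          simp [pvGroupFrom, h]
      | none =>
          rw [pvGroupStep_none h, if_neg (by simp), pvAppendLast_append, ih segs k (acc ++ [l])]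
          simp [pvGroupFrom, h]

theorem pvGroupFrom_ne_nil (ls : List String) (k : String) (acc : List String) :
    pvGroupFrom k acc ls ≠ [] := by
  induction ls generalizing k acc with
  | nil => simp [pvGroupFrom]
  | cons l rest ih =>
      simp only [pvGroupFrom]
      cases h : pvSections.get? (PySem.Str.strip l) <;> simp [ih]

theorem pvFinish_cons (ended : Bool) (d : PySem.Dict String String) (k : String)
    (b : List String) (gs : List (String × List String)) (h : gs ≠ []) :
    pvFinish ended d ((k, b) :: gs) = pvFinish ended (d.insert k (pvJS b)) gs := by
  cases gs with
  | nil => exact absurd rfl h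
  | cons s t => rfl

theorem pvReduce_from (ended : Bool) (n : Nat) (segs : List (String × List String)) :
    ∀ (d : PySem.Dict String String) (j : Int), 0 ≤ j → j + segs.length = n →
    ((PySem.List.enumerate segs j).foldl (pvReduceStep ended n) d) = pvFinish ended d segs := by
  induction segs with
  | nil => intro d j _ _; simp [PySem.List.enumerate_nil, pvFinish]
  | cons s t ih =>
      intro d j hj hn
      obtain ⟨k, b⟩ := s
      rw [PySem.List.enumerate_cons, List.foldl_cons]
      cases t with
      | nil =>
          have hlt : ¬ (j < (n : Int) - 1) := by simp at hn; omega
          simp only [PySem.List.enumerate_nil, List.foldl_nil]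
          cases ended with
          | true => simp [pvReduceStep, pvFinish]
          | false => simp [pvReduceStep, pvFinish, hlt]
      | cons s2 t2 =>
          have hlt : j < (n : Int) - 1 := by
            simp [List.length_cons] at hn; omega
          have h1 : pvReduceStep ended n d (j, (k, b)) = d.insert k (pvJS b) := by
            simp [pvReduceStep, hlt]
          rw [h1, ih (d.insert k (pvJS b)) (j + 1) (by omega) (by simp at hn ⊢; omega)]
          rw [pvFinish_cons ended d k b (s2 :: t2) (by simp)]

theorem parseLoopA_some (lines : List String) :
    ∀ (d : PySem.Dict String String) (k : String) (acc : List String),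
    parseLoopA lines d (some k) acc =
      pvFinish (pvTruncate lines).2 d (pvGroupFrom k acc (pvTruncate lines).1) := by
  induction lines with
  | nil => intro d k acc; simp [parseLoopA, pvTruncate, pvGroupFrom, pvFinish]
  | cons l rest ih =>
      intro d k acc
      cases h : pvSections.get? (PySem.Str.strip l) with
      | some key =>
          have hne : PySem.Str.strip l ≠ "---END---" := by
            intro he; rw [he, pvSections_end_none] at h; simp at h
          simp only [parseLoopA, h, pvTruncate, if_neg hne]
          rw [ih (d.insert k (pvJS acc)) key []]
          cases htr : pvTruncate rest with
          | mk c e =>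
              simp only [pvGroupFrom, h]
              rw [pvFinish_cons e d k acc (pvGroupFrom key [] c) (pvGroupFrom_ne_nil c key [])]
      | none =>
          by_cases he : PySem.Str.strip l = "---END---"
          · simp only [parseLoopA, h, pvTruncate, if_pos he]
            simp [pvGroupFrom, pvFinish]
          · simp only [parseLoopA, h, pvTruncate, if_neg he]
            rw [ih d k (acc ++ [l])]
            cases htr : pvTruncate rest with
            | mk c e =>
                simp only [pvGroupFrom, h]

theorem parseLoopA_none (lines : List String) :
    ∀ (d : PySem.Dict String String),
    parseLoopA lines d none [] =
      pvFinish (pvTruncate lines).2 d ((pvTruncate lines).1.foldl pvGroupStep []) := by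
  induction lines with
  | nil => intro d; simp [parseLoopA, pvTruncate, pvFinish]
  | cons l rest ih =>
      intro d
      cases h : pvSections.get? (PySem.Str.strip l) with
      | some key =>
          have hne : PySem.Str.strip l ≠ "---END---" := by
            intro he; rw [he, pvSections_end_none] at h; simp at h
          simp only [parseLoopA, h, pvTruncate, if_neg hne]
          rw [parseLoopA_some rest d key []]
          cases htr : pvTruncate rest with
          | mk c e =>
              simp only [List.foldl_cons]
              rw [pvGroupStep_some h, pvGroup_from c [] key []]
              simp
      | none =>
          by_cases he : PySem.Str.strip l = "---END---"
          · simp only [parseLoopA, h, pvTruncate, if_pos he]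
            simp [pvFinish]
          · simp only [parseLoopA, h, pvTruncate, if_neg he]
            rw [ih d]
            simp only [List.foldl_cons]
            rw [pvGroupStep_none h]
            simp

-- ===== VERDICT (by name: the statement is the Claim_ definition above) =====
theorem parse_draft_spec : Claim_equal_parse_draft := by
  intro raw_text _
  unfold Spec_parse_draft parse_draft parse_draft_alt
  rw [parseLoopA_none ((PySem.Str.split? raw_text "\n").getD []) PySem.Dict.empty]
  cases htr : pvTruncate ((PySem.Str.split? raw_text "\n").getD []) with
  | mk cut ended =>
      simp only [htr]
      rw [pvReduce_from ended (cut.foldl pvGroupStep []).length (cut.foldl pvGroupStep [])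
        PySem.Dict.empty 0 (by omega) (by simp)]
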